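-- pv_equiv track=rewrite | github.com/liangmuxue/SLFCD | utils/constance.py | get_combine_label_with_type
-- ===== SOURCE A (Python) =====
-- Combine_Label_Dict_hsil = [
--     {"code": 1, "type": "hsil"},
--     {"code": 0, "type": "normal"}
-- ]
--
-- Combine_Label_Dict_lsil = [
--     {"code": 1, "type": "lsil"},
--     {"code": 0, "type": "normal"}
-- ]
--
-- Combine_Label_Dict_ais = [
--     {"code": 1, "type": "ais"},
--     {"code": 0, "type": "normal"}
-- ]
--
-- def get_combine_label_with_type(type, mode='hsil'):
--     if mode == 'hsil':
--         for item in Combine_Label_Dict_hsil: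
--             if type == item["type"]:
--                 return item["code"]
--     if mode == 'lsil':
--         for item in Combine_Label_Dict_lsil:
--             if type == item["type"]:
--                 return item["code"]
--     if mode == 'ais':
--         for item in Combine_Label_Dict_ais:
--             if type == item["type"]:
--                 return item["code"]
-- ===== SOURCE B (Python) =====
-- def get_combine_label_with_type(type, mode='hsil'):
--     # closed form: code is fully determined by (mode, type)
--     if mode in ('hsil', 'lsil', 'ais'):
--         if type == mode:
--             return 1
--         if type == 'normal':
--             return 0
--     return None
-- ===== Notes on version B (the rewrite author's own statement) =====
-- stated objective: simpler
-- what changed: Replaced the three constant list scans over module-level dict lists with a direct closed-form conditional on (mode, type), dropping the tables entirely.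
import Mathlib
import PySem

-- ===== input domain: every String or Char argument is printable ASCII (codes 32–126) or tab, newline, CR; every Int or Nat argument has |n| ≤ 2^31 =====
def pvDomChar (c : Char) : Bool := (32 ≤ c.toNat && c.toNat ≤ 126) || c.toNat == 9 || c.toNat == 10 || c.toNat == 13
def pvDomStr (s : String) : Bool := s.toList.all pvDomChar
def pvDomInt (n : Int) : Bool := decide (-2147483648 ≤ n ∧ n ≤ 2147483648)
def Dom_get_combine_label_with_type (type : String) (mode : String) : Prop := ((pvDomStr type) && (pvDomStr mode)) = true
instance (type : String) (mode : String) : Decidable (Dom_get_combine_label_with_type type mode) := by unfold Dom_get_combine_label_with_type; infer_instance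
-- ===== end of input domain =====

-- B replaces A's three constant-table scans with a closed-form conditional on (mode, type); objective: simpler.

-- ===== PORT A =====
-- each dict {"code": c, "type": t} is an association list [("code", c-as-int), ("type", t-as-str)];
-- since values mix int and str, we model each item directly as its two fields (code, type).
def Combine_Label_Dict_hsil : List (Int × String) := [(1, "hsil"), (0, "normal")]
def Combine_Label_Dict_lsil : List (Int × String) := [(1, "lsil"), (0, "normal")]
def Combine_Label_Dict_ais : List (Int × String) := [(1, "ais"), (0, "normal")]

-- the 'for item in …: if type == item["type"]: return item["code"]' loop
def pvScan (type : String) : List (Int × String) → Option Int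
  | [] => none
  | item :: rest => if type == item.2 then some item.1 else pvScan type rest

def get_combine_label_with_type (type : String) (mode : String) : Option Int :=
  match (if mode == "hsil" then pvScan type Combine_Label_Dict_hsil else none) with
  | some r => some r
  | none =>
    match (if mode == "lsil" then pvScan type Combine_Label_Dict_lsil else none) with
    | some r => some r
    | none =>
      if mode == "ais" then pvScan type Combine_Label_Dict_ais else none

-- ===== PORT B =====
def get_combine_label_with_type_alt (type : String) (mode : String) : Option Int :=
  if mode == "hsil" || mode == "lsil" || mode == "ais" then
    if type == mode then some 1
    else if type == "normal" then some 0
    else none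
  else none

-- ===== PRECONDITION & SPEC =====
def Spec_get_combine_label_with_type (type : String) (mode : String) (out : Option Int) : Prop := out = get_combine_label_with_type_alt type mode
instance (type : String) (mode : String) (out : Option Int) : Decidable (Spec_get_combine_label_with_type type mode out) := by unfold Spec_get_combine_label_with_type; infer_instance

-- ===== CLAIM (what is proved, stated in full; the proofs are below) =====
def Claim_equal_get_combine_label_with_type : Prop := ∀ (type : String) (mode : String), Dom_get_combine_label_with_type type mode → Spec_get_combine_label_with_type type mode (get_combine_label_with_type type mode)

-- ===== LEMMAS AND PROOFS =====

-- ===== VERDICT (by name: the statement is the Claim_ definition above) =====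
theorem get_combine_label_with_type_spec : Claim_equal_get_combine_label_with_type := by
  intro type mode _
  unfold Spec_get_combine_label_with_type get_combine_label_with_type get_combine_label_with_type_alt
  simp only [pvScan, Combine_Label_Dict_hsil, Combine_Label_Dict_lsil, Combine_Label_Dict_ais]
  by_cases h1 : mode = "hsil" <;> by_cases h2 : mode = "lsil" <;> by_cases h3 : mode = "ais" <;>
    simp_all <;>
    by_cases t1 : type = mode <;> by_cases t2 : type = "normal" <;> simp_all
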